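-- pv_equiv track=rewrite | github.com/pypi-data/pypi-mirror-312 | packages/janito/janito-0.1.0-py3-none-any.whl/janito/change.py | _apply_indentation
-- ===== SOURCE A (Python) =====
-- from typing import Optional, List, Set
--
-- def _apply_indentation(new_content: List[str], base_indent: int, first_line_indent: Optional[int] = None) -> List[str]:
--     """Apply consistent indentation to new content
--     Args:
--         new_content: List of lines to indent
--         base_indent: Base indentation level to apply
--         first_line_indent: Optional indentation of first line in original block for relative indenting
--     Returns:
--         List of indented lines
--     """
--     if not new_content:
--         return []
--
--     indented_content = []
--     for i, line in enumerate(new_content):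
--         if not line.strip():
--             indented_content.append('')
--             continue
--
--         # For first non-empty line, use base indentation
--         if not indented_content or all(not l.strip() for l in indented_content):
--             curr_indent = base_indent
--         else:
--             # Calculate relative indentation from first line
--             if first_line_indent is None:
--                 first_line_indent = len(new_content[0]) - len(new_content[0].lstrip())
--             # Maintain relative indentation from first line
--             curr_indent = base_indent + (len(line) - len(line.lstrip()) - first_line_indent)
--         indented_content.append(' ' * max(0, curr_indent) + line.lstrip())
--
--     return indented_content
-- ===== SOURCE B (Python) =====
-- def _apply_indentation(new_content, base_indent, first_line_indent=None):
--     """Apply consistent indentation (span-based: blank prefix, first non-empty line, stateless tail)."""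
--     if not new_content:
--         return []
--     fli = first_line_indent if first_line_indent is not None else len(new_content[0]) - len(new_content[0].lstrip())
--     k = next((i for i, l in enumerate(new_content) if l.strip()), len(new_content))
--     out = [''] * k
--     if k < len(new_content):
--         t = new_content[k].lstrip()
--         out.append(t.rjust(max(0, base_indent) + len(t)))
--         for l in new_content[k + 1:]:
--             if not l.strip():
--                 out.append('')
--             else:
--                 t = l.lstrip()
--                 out.append(t.rjust(max(0, base_indent + (len(l) - len(t) - fli)) + len(t)))
--     return out
-- ===== Notes on version B (the rewrite author's own statement) =====
-- stated objective: simpler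
-- what changed: Replaces A's stateful loop (which rescans the growing output list every iteration to decide 'have we emitted a non-empty line yet' and lazily mutates first_line_indent) with a span decomposition: locate the first non-empty line up front, emit a blank prefix, the base-indented first line, and a stateless comprehension for the tail.
import Mathlib
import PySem

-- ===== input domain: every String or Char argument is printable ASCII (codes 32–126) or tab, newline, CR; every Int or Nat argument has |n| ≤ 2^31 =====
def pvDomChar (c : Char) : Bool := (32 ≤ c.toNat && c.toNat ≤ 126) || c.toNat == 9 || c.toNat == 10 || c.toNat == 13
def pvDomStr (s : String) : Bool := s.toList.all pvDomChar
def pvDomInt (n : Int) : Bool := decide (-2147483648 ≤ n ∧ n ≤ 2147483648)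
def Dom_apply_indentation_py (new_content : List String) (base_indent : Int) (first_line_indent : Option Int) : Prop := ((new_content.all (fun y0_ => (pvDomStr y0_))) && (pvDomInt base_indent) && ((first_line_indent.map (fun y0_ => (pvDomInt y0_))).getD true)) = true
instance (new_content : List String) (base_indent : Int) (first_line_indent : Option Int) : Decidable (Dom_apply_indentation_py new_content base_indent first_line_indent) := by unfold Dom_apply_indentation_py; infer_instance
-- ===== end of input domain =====

-- B replaces A's stateful loop (accumulator rescans + lazily-threaded first_line_indent) by a
-- span decomposition: blank prefix, first non-empty line, stateless tail transform (objective: simpler).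

-- shared string helpers (Python's line.strip() truthiness, len(l)-len(l.lstrip()), ' '*max(0,c)+l.lstrip())
def pvBlank (s : String) : Bool := (PySem.Chars.strip s.toList).isEmpty
def pvIndentOf (s : String) : Int := (s.toList.length : Int) - ((PySem.Chars.lstrip s.toList).length : Int)
def pvPad (c : Int) (s : String) : String := String.ofList (List.replicate (max 0 c).toNat ' ' ++ PySem.Chars.lstrip s.toList)

-- ===== PORT A =====
-- the for-loop: state = (first_line_indent, indented_content); `first` is new_content[0]
def pvALoop (first : String) (base : Int) : List String → Option Int → List String → List String
  | [], _, acc => acc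
  | line :: rest, fli, acc =>
    if pvBlank line then pvALoop first base rest fli (acc ++ [""])
    else if acc.all pvBlank then pvALoop first base rest fli (acc ++ [pvPad base line])
    else
      let f := fli.getD (pvIndentOf first)
      pvALoop first base rest (some f) (acc ++ [pvPad (base + (pvIndentOf line - f)) line])

def apply_indentation_py (new_content : List String) (base_indent : Int) (first_line_indent : Option Int) : List String :=
  match new_content with
  | [] => []
  | first :: _ => pvALoop first base_indent new_content first_line_indent []

-- ===== PORT B =====
-- str.rjust(w) with the space fill character (hand-ported; exact for w ≥ 0)
def pvRJustChars (cs : List Char) (w : Nat) : List Char :=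
  if cs.length < w then List.replicate (w - cs.length) ' ' ++ cs else cs
-- B's line builder: t = l.lstrip(); t.rjust(max(0,c) + len(t))
def pvPadB (c : Int) (s : String) : String :=
  String.ofList (pvRJustChars (PySem.Chars.lstrip s.toList)
    ((max 0 c).toNat + (PySem.Chars.lstrip s.toList).length))
def apply_indentation_py_alt (new_content : List String) (base_indent : Int) (first_line_indent : Option Int) : List String :=
  match new_content with
  | [] => []
  | first0 :: _ =>
    let fli := first_line_indent.getD (pvIndentOf first0)
    let k := (new_content.findIdx? (fun l => !pvBlank l)).getD new_content.length
    let head := List.replicate k ""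
    match new_content.drop k with
    | [] => head
    | first :: rest =>
      rest.foldl (fun out l => out ++ [if pvBlank l then "" else pvPadB (base_indent + (pvIndentOf l - fli)) l])
        (head ++ [pvPadB base_indent first])

-- ===== PRECONDITION & SPEC =====
def Spec_apply_indentation_py (new_content : List String) (base_indent : Int) (first_line_indent : Option Int) (out : List String) : Prop := out = apply_indentation_py_alt new_content base_indent first_line_indent
instance (new_content : List String) (base_indent : Int) (first_line_indent : Option Int) (out : List String) : Decidable (Spec_apply_indentation_py new_content base_indent first_line_indent out) := by unfold Spec_apply_indentation_py; infer_instance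

-- ===== CLAIM (what is proved, stated in full; the proofs are below) =====
def Claim_equal_apply_indentation_py : Prop := ∀ (new_content : List String) (base_indent : Int) (first_line_indent : Option Int), Dom_apply_indentation_py new_content base_indent first_line_indent → Spec_apply_indentation_py new_content base_indent first_line_indent (apply_indentation_py new_content base_indent first_line_indent)

-- ===== LEMMAS AND PROOFS =====

-- the per-line transform of B's tail, once the first non-empty line has been emitted
def pvRelMap (base F : Int) (xs : List String) : List String :=
  xs.map (fun l => if pvBlank l then "" else pvPad (base + (pvIndentOf l - F)) l)

-- a reference shape for the whole output: blanks until the first non-empty line, then pvRelMap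
def pvHead (base F : Int) : List String → List String
  | [] => []
  | l :: ls => if pvBlank l then "" :: pvHead base F ls else pvPad base l :: pvRelMap base F ls

theorem pvDropWhile_idem (p : Char → Bool) (xs : List Char) :
    List.dropWhile p (List.dropWhile p xs) = List.dropWhile p xs := by
  induction xs with
  | nil => rfl
  | cons x xs ih => by_cases h : p x = true <;> simp [h, ih]

theorem pvPadB_eq (c : Int) (s : String) : pvPadB c s = pvPad c s := by
  unfold pvPadB pvPad pvRJustChars
  by_cases h : (max 0 c).toNat = 0
  · simp [h]
  · rw [if_pos (by omega)]
    simp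

theorem pvBlank_pad (c : Int) (s : String) : pvBlank (pvPad c s) = pvBlank s := by
  have hsp : PySem.Chars.isspace ' ' = true := by decide
  simp [pvBlank, pvPad, PySem.Chars.strip, PySem.Chars.lstrip, hsp, pvDropWhile_idem]

theorem pvBlank_empty : pvBlank "" = true := by decide

theorem pvALoop_post (first : String) (base F : Int) :
    ∀ (xs acc : List String) (fli : Option Int),
      fli.getD (pvIndentOf first) = F → acc.all pvBlank = false →
      pvALoop first base xs fli acc = acc ++ pvRelMap base F xs := by
  intro xs
  induction xs with
  | nil => intro acc fli _ _; simp [pvALoop, pvRelMap]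
  | cons line rest ih =>
    intro acc fli hf hacc
    by_cases hb : pvBlank line = true
    · rw [pvALoop]
      simp only [hb, if_true]
      rw [ih (acc ++ [""]) fli hf (by simp [hacc])]
      simp [pvRelMap, hb]
    · rw [pvALoop]
      simp only [hb, hacc, if_false, Bool.false_eq_true]
      rw [hf, ih (acc ++ [pvPad (base + (pvIndentOf line - F)) line]) (some F) rfl
            (by simp [hacc])]
      simp [pvRelMap, hb]

theorem pvALoop_pre (first : String) (base F : Int) :
    ∀ (xs acc : List String) (fli : Option Int),
      fli.getD (pvIndentOf first) = F → acc.all pvBlank = true →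
      pvALoop first base xs fli acc = acc ++ pvHead base F xs := by
  intro xs
  induction xs with
  | nil => intro acc fli _ _; simp [pvALoop, pvHead]
  | cons line rest ih =>
    intro acc fli hf hacc
    by_cases hb : pvBlank line = true
    · rw [pvALoop]
      simp only [hb, if_true]
      rw [ih (acc ++ [""]) fli hf (by simp [hacc, pvBlank_empty])]
      simp [pvHead, hb]
    · rw [pvALoop]
      simp only [hb, hacc, if_false, if_true, Bool.false_eq_true]
      rw [pvALoop_post first base F rest (acc ++ [pvPad base line]) fli hf
            (by rw [List.all_append]; simp [pvBlank_pad, hb])]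
      simp [pvHead, hb]

theorem pvAlt_body (base F : Int) :
    ∀ (xs : List String),
      (match xs.drop ((xs.findIdx? (fun l => !pvBlank l)).getD xs.length) with
       | [] => List.replicate ((xs.findIdx? (fun l => !pvBlank l)).getD xs.length) ""
       | first :: rest =>
         List.replicate ((xs.findIdx? (fun l => !pvBlank l)).getD xs.length) ""
           ++ [pvPad base first] ++ pvRelMap base F rest)
      = pvHead base F xs := by
  intro xs
  induction xs with
  | nil => simp [pvHead]
  | cons l ls ih =>
    by_cases hb : pvBlank l = true
    · have hfind : List.findIdx? (fun l => !pvBlank l) (l :: ls)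
          = (List.findIdx? (fun l => !pvBlank l) ls).map (· + 1) := by
        rw [List.findIdx?_cons]; simp [hb]
      have hk : (List.findIdx? (fun l => !pvBlank l) (l :: ls)).getD (l :: ls).length
          = (List.findIdx? (fun l => !pvBlank l) ls).getD ls.length + 1 := by
        rw [hfind]; cases List.findIdx? (fun l => !pvBlank l) ls <;> simp
      rw [hk]
      simp only [List.drop_succ_cons, List.replicate_succ]
      rw [pvHead]
      simp only [hb, if_true]
      rw [← ih]
      cases ls.drop ((List.findIdx? (fun l => !pvBlank l) ls).getD ls.length) <;> simp
    · have hk : (List.findIdx? (fun l => !pvBlank l) (l :: ls)).getD (l :: ls).length = 0 := by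
        rw [List.findIdx?_cons]; simp [hb]
      rw [hk]
      simp [pvHead, hb]

-- ===== VERDICT (by name: the statement is the Claim_ definition above) =====
theorem apply_indentation_py_spec : Claim_equal_apply_indentation_py := by
  intro new_content base_indent first_line_indent _
  unfold Spec_apply_indentation_py
  cases new_content with
  | nil => rfl
  | cons first rest =>
    show pvALoop first base_indent (first :: rest) first_line_indent [] = _
    rw [pvALoop_pre first base_indent (first_line_indent.getD (pvIndentOf first))
          (first :: rest) [] first_line_indent rfl (by simp)]
    simp only [List.nil_append]
    rw [apply_indentation_py_alt]
    rw [← pvAlt_body base_indent (first_line_indent.getD (pvIndentOf first)) (first :: rest)]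
    cases hd : (first :: rest).drop
        (((first :: rest).findIdx? (fun l => !pvBlank l)).getD (first :: rest).length) with
    | nil => simp [hd]
    | cons f r =>
      simp only [hd, pvPadB_eq, PySem.List.foldl_append_singleton_eq_map, pvRelMap,
        List.append_assoc, List.singleton_append]
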